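-- pv_equiv track=rewrite | github.com/kaleidawave/crates-release-gh-action | updator.py | format_change_list
-- ===== SOURCE A (Python) =====
-- def format_change_list(iter):
-- 	msg = ""
-- 	for iteration, (name, value) in enumerate(iter, 1):
-- 		if not iteration == 1:
-- 			if len(iter) == iteration:
-- 				msg += " and "
-- 			else:
-- 				msg += ", "
--
-- 		msg += f"{name} to {value}"
-- 	return msg
-- ===== SOURCE B (Python) =====
-- def format_change_list(iter):
-- 	parts = [f"{name} to {value}" for name, value in iter]
-- 	if not parts:
-- 		return ""
-- 	if len(parts) == 1:
-- 		return parts[0]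
-- 	return ", ".join(parts[:-1]) + " and " + parts[-1]
-- ===== Notes on version B (the rewrite author's own statement) =====
-- stated objective: simpler
-- what changed: Replaces A's per-iteration separator branching (keyed on the 1-based index and len(iter)) inside one accumulating loop by a collect-then-join strategy: build the 'name to value' parts first, then join all but the last with ', ' and append ' and ' plus the last part.
import Mathlib
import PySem

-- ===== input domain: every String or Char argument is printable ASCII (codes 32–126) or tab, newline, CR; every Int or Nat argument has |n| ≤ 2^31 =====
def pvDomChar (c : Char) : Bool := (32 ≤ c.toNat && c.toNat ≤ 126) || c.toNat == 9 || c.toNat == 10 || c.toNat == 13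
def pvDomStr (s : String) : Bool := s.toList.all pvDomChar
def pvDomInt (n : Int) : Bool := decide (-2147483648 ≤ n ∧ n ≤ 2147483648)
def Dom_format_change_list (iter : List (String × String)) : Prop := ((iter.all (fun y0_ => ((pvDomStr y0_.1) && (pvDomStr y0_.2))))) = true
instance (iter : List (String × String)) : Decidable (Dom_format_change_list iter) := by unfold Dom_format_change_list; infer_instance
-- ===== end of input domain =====

-- B replaces A's per-iteration separator branching by collect-the-parts-then-join; objective: simpler.

-- ===== PORT A =====
-- one loop iteration of A: optional separator first (depends on the 1-based index p.1
-- and the total length n), then append "name to value"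
def pvStepA (n : Int) (msg : String) (p : Int × String × String) : String :=
  let msg := if ¬ (p.1 = 1) then
      (if n = p.1 then msg ++ " and " else msg ++ ", ")
    else msg
  msg ++ p.2.1 ++ " to " ++ p.2.2

def format_change_list (iter : List (String × String)) : String :=
  (PySem.List.enumerate iter 1).foldl (pvStepA (iter.length : Int)) ""

-- ===== PORT B =====
def format_change_list_alt (iter : List (String × String)) : String :=
  let parts := iter.map (fun nv => nv.1 ++ " to " ++ nv.2)
  if parts = [] then ""
  else if parts.length = 1 then parts.head!
  else PySem.Str.join ", " parts.dropLast ++ " and " ++ parts.getLast!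

-- ===== PRECONDITION & SPEC =====
def Spec_format_change_list (iter : List (String × String)) (out : String) : Prop := out = format_change_list_alt iter
instance (iter : List (String × String)) (out : String) : Decidable (Spec_format_change_list iter out) := by unfold Spec_format_change_list; infer_instance

-- ===== CLAIM (what is proved, stated in full; the proofs are below) =====
def Claim_equal_format_change_list : Prop := ∀ (iter : List (String × String)), Dom_format_change_list iter → Spec_format_change_list iter (format_change_list iter)

-- ===== LEMMAS AND PROOFS =====

-- proof-side rendering of one pair
def pvPart (p : String × String) : String := p.1 ++ " to " ++ p.2

-- proof-side rendering of the tail (the elements after the first): every element is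
-- preceded by ", " except the last, which is preceded by " and "
def pvTail : List String → String
  | [] => ""
  | [a] => " and " ++ a
  | a :: b :: rest => ", " ++ a ++ pvTail (b :: rest)

-- A's loop over the elements at 1-based positions s, s+1, … (s ≥ 2, n the total length)
-- appends exactly pvTail of their renderings
theorem pvA_fold (xs : List (String × String)) : ∀ (s n : Int) (msg : String),
    2 ≤ s → n = s + xs.length - 1 →
    (PySem.List.enumerate xs s).foldl (pvStepA n) msg = msg ++ pvTail (xs.map pvPart) := by
  induction xs with
  | nil =>
    intro s n msg _ _
    apply String.toList_injective
    simp [PySem.List.enumerate_nil, pvTail]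
  | cons x rest ih =>
    intro s n msg hs hn
    rw [PySem.List.enumerate_cons]
    cases rest with
    | nil =>
      have h1 : ¬ ((s : Int) = 1) := by omega
      have h2 : n = s := by simp at hn; omega
      apply String.toList_injective
      simp [pvStepA, h1, h2, pvTail, pvPart, PySem.List.enumerate_nil]
    | cons y rest' =>
      have h1 : ¬ ((s : Int) = 1) := by omega
      have h2 : ¬ (n = s) := by simp at hn; omega
      have h3 : n = (s + 1) + ((y :: rest').length : Int) - 1 := by simp at hn ⊢; omega
      rw [List.foldl_cons, ih (s + 1) n _ (by omega) h3]
      apply String.toList_injective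
      simp [pvStepA, h1, h2, pvTail, pvPart]

-- B's join-then-and assembly over a :: l (l nonempty) equals a followed by pvTail l
theorem pvB_join (l : List String) : ∀ (a : String), l ≠ [] →
    PySem.Str.join ", " ((a :: l).dropLast) ++ " and " ++ (a :: l).getLast! = a ++ pvTail l := by
  induction l with
  | nil => intro a h; exact absurd rfl h
  | cons b rest ih =>
    intro a _
    cases rest with
    | nil =>
      apply String.toList_injective
      simp [pvTail, PySem.Str.join, List.getLast!]
    | cons c rest' =>
      have h := ih b (by simp)
      have hdl : (a :: b :: c :: rest').dropLast = a :: (b :: c :: rest').dropLast := by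
        simp [List.dropLast]
      have hgl : (a :: b :: c :: rest').getLast! = (b :: c :: rest').getLast! := by
        simp [List.getLast!]
      rw [hdl, hgl]
      have hdl2 : ∃ d ds, (b :: c :: rest').dropLast = d :: ds := by
        cases rest' <;> simp [List.dropLast]
      obtain ⟨d, ds, hds⟩ := hdl2
      rw [hds] at h ⊢
      apply String.toList_injective
      have h' := congrArg String.toList h
      simp [PySem.Str.join, PySem.Chars.join_cons_cons, pvTail] at h' ⊢
      simp [h']

-- ===== VERDICT (by name: the statement is the Claim_ definition above) =====
theorem format_change_list_spec : Claim_equal_format_change_list := by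
  intro iter _
  unfold Spec_format_change_list format_change_list format_change_list_alt
  cases iter with
  | nil => rfl
  | cons x rest =>
    cases rest with
    | nil =>
      apply String.toList_injective
      simp [PySem.List.enumerate_cons, PySem.List.enumerate_nil, pvStepA]
    | cons y rest' =>
      rw [PySem.List.enumerate_cons, List.foldl_cons]
      have hn : ((x :: y :: rest').length : Int) = 2 + ((y :: rest').length : Int) - 1 := by
        simp; omega
      rw [show (1 : Int) + 1 = 2 by norm_num, pvA_fold (y :: rest') 2 _ _ (by omega) hn]
      have hmap : (x :: y :: rest').map (fun nv => nv.1 ++ " to " ++ nv.2)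
          = pvPart x :: (y :: rest').map pvPart := by simp [pvPart]
      have hB := pvB_join ((y :: rest').map pvPart) (pvPart x) (by simp)
      simp only [hmap]
      rw [if_neg (by simp), if_neg (by simp)]
      rw [hB]
      apply String.toList_injective
      simp [pvStepA, pvPart]
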